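-- pv_equiv track=rewrite | github.com/zzw4257/Seed-Network-Security-Skill | skills/zju-seed-lab-runner/scripts/seed_lab_runner.py | short_block
-- ===== SOURCE A (Python) =====
-- def short_block(text, max_lines=14):
--     lines = [line for line in text.strip().splitlines() if line.strip()]
--     if not lines:
--         return "无"
--     preview = lines[:max_lines]
--     if len(lines) > max_lines:
--         preview.append("...")
--     return "\n".join(preview)
-- ===== SOURCE B (Python) =====
-- def short_block(text, max_lines=14):
--     preview = []
--     overflow = False
--     for line in text.strip().splitlines():
--         if line.strip():
--             preview.append(line)
--             if len(preview) > max_lines: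
--                 preview.pop()
--                 overflow = True
--                 break
--     if overflow:
--         preview.append("...")
--     return "\n".join(preview) if preview else "无"
-- ===== Notes on version B (the rewrite author's own statement) =====
-- stated objective: alternative
-- what changed: Replaces the full filter-comprehension plus slice with a single early-breaking loop that stops scanning as soon as the preview window overflows.
-- outside the precondition, e.g. on short_block('a\nb', -1): A returns 'a\n...', B returns '...'
import Mathlib
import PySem

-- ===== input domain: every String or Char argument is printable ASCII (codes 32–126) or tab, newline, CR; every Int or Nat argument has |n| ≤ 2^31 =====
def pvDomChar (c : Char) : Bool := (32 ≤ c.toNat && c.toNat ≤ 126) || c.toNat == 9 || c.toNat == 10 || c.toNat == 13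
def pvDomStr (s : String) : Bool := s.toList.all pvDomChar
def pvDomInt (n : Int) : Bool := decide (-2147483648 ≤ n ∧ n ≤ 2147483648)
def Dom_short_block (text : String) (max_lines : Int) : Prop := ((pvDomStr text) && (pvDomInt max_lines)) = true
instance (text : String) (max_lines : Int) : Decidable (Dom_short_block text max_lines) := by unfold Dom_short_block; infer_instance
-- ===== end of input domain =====

-- B replaces the filter-comprehension-then-slice with a single early-breaking loop; alternative decomposition, not claimed faster.

-- ===== PORT A =====
def short_block (text : String) (max_lines : Int) : String :=
  let lines := (PySem.Str.splitlines (PySem.Str.strip text)).filter (fun l => PySem.Str.strip l != "")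
  if lines = [] then "无"
  else
    let preview := PySem.List.slice lines none (some max_lines)
    let preview := if (lines.length : Int) > max_lines then preview ++ ["..."] else preview
    PySem.Str.join "\n" preview

-- ===== PORT B =====
-- the for-loop of Source B with its early break: state = (preview, overflow)
def altLoop (max_lines : Int) (acc : List String) : List String → List String × Bool
  | [] => (acc, false)
  | l :: rest =>
    if PySem.Str.strip l != "" then
      let acc' := acc ++ [l]
      if (acc'.length : Int) > max_lines then (acc'.dropLast, true)  -- preview.pop(); overflow = True; break
      else altLoop max_lines acc' rest
    else altLoop max_lines acc rest

def short_block_alt (text : String) (max_lines : Int) : String :=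
  let r := altLoop max_lines [] (PySem.Str.splitlines (PySem.Str.strip text))
  let preview := if r.2 then r.1 ++ ["..."] else r.1
  if preview ≠ [] then PySem.Str.join "\n" preview else "无"

-- ===== PRECONDITION & SPEC =====
-- Pre_ excludes negative max_lines (outside the natural domain of a preview line count): there A's
-- lines[:max_lines] accidentally keeps all but the last |max_lines| lines via Python's
-- negative-slice-from-the-end rule, while B's loop naturally shows none.
def Pre_short_block (text : String) (max_lines : Int) : Prop := 0 ≤ max_lines
instance (text : String) (max_lines : Int) : Decidable (Pre_short_block text max_lines) := by unfold Pre_short_block; infer_instance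
def pvWitness_short_block : String × Int := ("a\n\n b\nc", 2)

def Spec_short_block (text : String) (max_lines : Int) (out : String) : Prop := out = short_block_alt text max_lines
instance (text : String) (max_lines : Int) (out : String) : Decidable (Spec_short_block text max_lines out) := by unfold Spec_short_block; infer_instance

-- ===== CLAIM (what is proved, stated in full; the proofs are below) =====
def Claim_equal_short_block : Prop := ∀ (text : String) (max_lines : Int), Dom_short_block text max_lines → Pre_short_block text max_lines → Spec_short_block text max_lines (short_block text max_lines)

-- ===== LEMMAS AND PROOFS =====

def altSpec (m : Int) (g : List String) : List String × Bool :=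
  if (g.length : Int) ≤ m then (g, false) else (g.take m.toNat, true)

theorem altLoop_eq (m : Int) (hm : 0 ≤ m) :
    ∀ (ls acc : List String), (acc.length : Int) ≤ m →
      altLoop m acc ls = altSpec m (acc ++ ls.filter (fun l => PySem.Str.strip l != "")) := by
  intro ls
  induction ls with
  | nil =>
    intro acc hacc
    simp [altLoop, altSpec, hacc]
  | cons l rest ih =>
    intro acc hacc
    by_cases hp : (PySem.Str.strip l != "") = true
    · rw [show List.filter (fun l => PySem.Str.strip l != "") (l :: rest)
            = l :: List.filter (fun l => PySem.Str.strip l != "") rest from by simp [hp]]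
      by_cases hov : ((acc ++ [l]).length : Int) > m
      · have hlen : m.toNat = acc.length := by
          simp at hov; omega
        have htake : ((acc ++ [l]) ++ rest.filter (fun l => PySem.Str.strip l != "")).take acc.length = acc := by
          rw [List.append_assoc, List.take_append_of_le_length (by simp)]
          simp
        simp only [altLoop, hp, if_true, hov, altSpec]
        rw [if_neg (by simp; simp at hov; omega)]
        rw [hlen]
        have h1 : (acc ++ [l]).dropLast
            = (acc ++ l :: rest.filter (fun l => PySem.Str.strip l != "")).take acc.length := by
          rw [show acc ++ l :: rest.filter (fun l => PySem.Str.strip l != "")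
                = (acc ++ [l]) ++ rest.filter (fun l => PySem.Str.strip l != "") from by simp,
              htake]
          simp
        rw [h1]
      · have hov' : ¬ ((acc ++ [l]).length : Int) > m := hov
        simp only [altLoop, hp, if_true, if_neg hov']
        rw [ih (acc ++ [l]) (by omega)]
        simp
    · have hp' : (PySem.Str.strip l != "") = false := by
        cases h : (PySem.Str.strip l != "") <;> simp_all
      rw [show List.filter (fun l => PySem.Str.strip l != "") (l :: rest)
            = List.filter (fun l => PySem.Str.strip l != "") rest from by simp [hp']]
      simp only [altLoop, hp', Bool.false_eq_true, if_false]
      exact ih acc hacc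

-- A's and B's post-processing agree on the filtered line list g
theorem main_aux (m : Int) (hm : 0 ≤ m) (g : List String) :
    (if g = [] then "无" else
       PySem.Str.join "\n" (if (g.length : Int) > m
        then PySem.List.slice g none (some m) ++ ["..."]
        else PySem.List.slice g none (some m)))
    = (let r := altSpec m g
       let preview := if r.2 then r.1 ++ ["..."] else r.1
       if preview ≠ [] then PySem.Str.join "\n" preview else "无") := by
  rw [PySem.List.slice_to g hm]
  unfold altSpec
  by_cases hle : (g.length : Int) ≤ m
  · have htk : List.take m.toNat g = g := List.take_of_length_le (by omega)
    by_cases hnil : g = []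
    · subst hnil
      simp [hm]
    · simp [hnil, hle, htk, show ¬ ((g.length : Int) > m) by omega]
  · have hnil : g ≠ [] := by
      intro h; subst h; simp at hle; omega
    simp [hnil, hle, show (g.length : Int) > m by omega]

-- ===== VERDICT (by name: the statement is the Claim_ definition above) =====
set_option maxHeartbeats 1600000 in
theorem short_block_spec : Claim_equal_short_block := by
  intro text m _hdom hm
  unfold Spec_short_block short_block short_block_alt
  have hm' : (0:Int) ≤ m := hm
  rw [altLoop_eq m hm' (PySem.Str.splitlines (PySem.Str.strip text)) [] (by simpa using hm')]
  exact main_aux m hm' _
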